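-- pv_equiv track=rewrite | github.com/tblackwe/aoc-2025 | solutions/day-09/solution.py | is_rectangle_valid
-- ===== SOURCE A (Python) =====
-- def is_rectangle_valid(corner1, corner2, valid_tiles):
--     """Check if all tiles in rectangle are in the valid tiles set.
--
--     This is the simple version for tests that pre-compute valid tiles.
--
--     Args:
--         corner1: (x, y) tuple for first corner
--         corner2: (x, y) tuple for second corner (opposite diagonal)
--         valid_tiles: Set of (x, y) tuples representing valid tiles
--
--     Returns:
--         True if all tiles in rectangle are valid, False otherwise
--     """
--     x1, y1 = corner1
--     x2, y2 = corner2
--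
--     x_min, x_max = min(x1, x2), max(x1, x2)
--     y_min, y_max = min(y1, y2), max(y1, y2)
--
--     # Check every tile in the rectangle (early termination)
--     for x in range(x_min, x_max + 1):
--         for y in range(y_min, y_max + 1):
--             if (x, y) not in valid_tiles:
--                 return False
--
--     return True
-- ===== SOURCE B (Python) =====
-- def is_rectangle_valid(corner1, corner2, valid_tiles):
--     """Check if all tiles in rectangle are valid, by counting distinct valid
--     tiles inside the bounds and comparing against the rectangle's area."""
--     x1, y1 = corner1
--     x2, y2 = corner2
--     x_min, x_max = min(x1, x2), max(x1, x2)
--     y_min, y_max = min(y1, y2), max(y1, y2)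
--     area = (x_max - x_min + 1) * (y_max - y_min + 1)
--     inside = {(tx, ty) for (tx, ty) in valid_tiles
--               if x_min <= tx <= x_max and y_min <= ty <= y_max}
--     return len(inside) == area
-- ===== Notes on version B (the rewrite author's own statement) =====
-- stated objective: faster
-- what changed: B never iterates over rectangle cells: it computes the rectangle area in closed form, filters the valid-tile list once into a deduplicated set of tiles lying within the bounds, and returns whether that set's size equals the area.
import Mathlib
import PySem

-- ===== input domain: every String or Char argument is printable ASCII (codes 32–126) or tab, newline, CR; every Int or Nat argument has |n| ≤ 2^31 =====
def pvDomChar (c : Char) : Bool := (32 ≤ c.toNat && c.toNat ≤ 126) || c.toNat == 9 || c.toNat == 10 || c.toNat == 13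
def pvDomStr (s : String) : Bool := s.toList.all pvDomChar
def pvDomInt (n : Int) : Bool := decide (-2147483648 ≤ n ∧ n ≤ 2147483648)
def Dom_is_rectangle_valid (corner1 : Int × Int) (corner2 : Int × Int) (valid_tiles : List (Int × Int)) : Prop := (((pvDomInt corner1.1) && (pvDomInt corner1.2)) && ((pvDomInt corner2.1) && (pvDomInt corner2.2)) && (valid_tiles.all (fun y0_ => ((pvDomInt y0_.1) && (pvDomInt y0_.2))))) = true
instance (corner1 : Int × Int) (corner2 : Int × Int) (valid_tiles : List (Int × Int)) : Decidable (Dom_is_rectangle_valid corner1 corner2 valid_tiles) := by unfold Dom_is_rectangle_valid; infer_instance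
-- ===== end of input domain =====

-- B replaces the per-cell rectangle scan by one pass over valid_tiles: it counts the distinct
-- in-bounds tiles and compares with the rectangle's area (closed form) — faster when the area is large.


-- ===== PORT A =====
-- 'for y in range(y_min, y_max + 1): if (x, y) not in valid_tiles: return False'
-- ported as the same lazy left-to-right traversal (Python's range yields y one at a time;
-- false = the early 'return False')
def pvInnerA (valid_tiles : List (Int × Int)) (x : Int) (y stop : Int) : Bool :=
  if y < stop then
    if ¬ ((x, y) ∈ valid_tiles) then false else pvInnerA valid_tiles x (y + 1) stop
  else true
termination_by (stop - y).toNat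
decreasing_by omega

-- the outer 'for x in range(x_min, x_max + 1)' loop
def pvOuterA (valid_tiles : List (Int × Int)) (y_min y_stop : Int) (x stop : Int) : Bool :=
  if x < stop then
    if pvInnerA valid_tiles x y_min y_stop = false then false
    else pvOuterA valid_tiles y_min y_stop (x + 1) stop
  else true
termination_by (stop - x).toNat
decreasing_by omega

def is_rectangle_valid (corner1 : Int × Int) (corner2 : Int × Int) (valid_tiles : List (Int × Int)) : Bool :=
  let x1 := corner1.1; let y1 := corner1.2
  let x2 := corner2.1; let y2 := corner2.2
  let x_min := min x1 x2; let x_max := max x1 x2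
  let y_min := min y1 y2; let y_max := max y1 y2
  pvOuterA valid_tiles y_min (y_max + 1) x_min (x_max + 1)

-- ===== PORT B =====
def is_rectangle_valid_alt (corner1 : Int × Int) (corner2 : Int × Int) (valid_tiles : List (Int × Int)) : Bool :=
  let x1 := corner1.1; let y1 := corner1.2
  let x2 := corner2.1; let y2 := corner2.2
  let x_min := min x1 x2; let x_max := max x1 x2
  let y_min := min y1 y2; let y_max := max y1 y2
  let area := (x_max - x_min + 1) * (y_max - y_min + 1)
  let inside : PySem.Set (Int × Int) :=
    PySem.Set.ofList (valid_tiles.filter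
      (fun t => decide (x_min ≤ t.1 ∧ t.1 ≤ x_max ∧ y_min ≤ t.2 ∧ t.2 ≤ y_max)))
  decide (PySem.Set.len inside = area)

-- ===== PRECONDITION & SPEC =====
def Spec_is_rectangle_valid (corner1 : Int × Int) (corner2 : Int × Int) (valid_tiles : List (Int × Int)) (out : Bool) : Prop := out = is_rectangle_valid_alt corner1 corner2 valid_tiles
instance (corner1 : Int × Int) (corner2 : Int × Int) (valid_tiles : List (Int × Int)) (out : Bool) : Decidable (Spec_is_rectangle_valid corner1 corner2 valid_tiles out) := by unfold Spec_is_rectangle_valid; infer_instance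

-- ===== CLAIM (what is proved, stated in full; the proofs are below) =====
def Claim_equal_is_rectangle_valid : Prop := ∀ (corner1 : Int × Int) (corner2 : Int × Int) (valid_tiles : List (Int × Int)), Dom_is_rectangle_valid corner1 corner2 valid_tiles → Spec_is_rectangle_valid corner1 corner2 valid_tiles (is_rectangle_valid corner1 corner2 valid_tiles)

-- ===== LEMMAS AND PROOFS =====

theorem pvInnerA_true_iff (tiles : List (Int × Int)) (x y stop : Int) :
    pvInnerA tiles x y stop = true ↔ ∀ y' : Int, y ≤ y' → y' < stop → (x, y') ∈ tiles := by
  fun_induction pvInnerA tiles x y stop with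
  | case1 y h hmem =>
    simp only [Bool.false_eq_true, false_iff]
    push Not
    exact ⟨y, le_refl y, h, hmem⟩
  | case2 y h hmem ih =>
    rw [ih]
    push Not at hmem
    constructor
    · intro hall y' hle hlt
      rcases eq_or_lt_of_le hle with rfl | hlt'
      · exact hmem
      · exact hall y' (by omega) hlt
    · intro hall y' hle hlt
      exact hall y' (by omega) hlt
  | case3 y h =>
    simp only [true_iff]
    intro y' hle hlt
    omega

theorem pvOuterA_true_iff (tiles : List (Int × Int)) (y_min y_stop x stop : Int) :
    pvOuterA tiles y_min y_stop x stop = true ↔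
      ∀ x' : Int, x ≤ x' → x' < stop → ∀ y' : Int, y_min ≤ y' → y' < y_stop → (x', y') ∈ tiles := by
  fun_induction pvOuterA tiles y_min y_stop x stop with
  | case1 x h hfalse =>
    simp only [Bool.false_eq_true, false_iff]
    push Not
    have := pvInnerA_true_iff tiles x y_min y_stop
    rw [hfalse] at this
    simp only [Bool.false_eq_true, false_iff] at this
    push Not at this
    obtain ⟨y', hy1, hy2, hy3⟩ := this
    exact ⟨x, le_refl x, h, y', hy1, hy2, hy3⟩
  | case2 x h hfalse ih =>
    have htrue : pvInnerA tiles x y_min y_stop = true := by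
      cases hb : pvInnerA tiles x y_min y_stop
      · exact absurd hb hfalse
      · rfl
    have hrow := (pvInnerA_true_iff tiles x y_min y_stop).mp htrue
    rw [ih]
    constructor
    · intro hall x' hle hlt
      rcases eq_or_lt_of_le hle with rfl | hlt'
      · exact hrow
      · exact hall x' (by omega) hlt
    · intro hall x' hle hlt
      exact hall x' (by omega) hlt
  | case3 x h =>
    simp only [true_iff]
    intro x' hle hlt
    omega

-- the rectangle as a Finset
theorem pv_main (tiles : List (Int × Int)) (a b c d : Int) (hab : a ≤ b) (hcd : c ≤ d) :
    (pvOuterA tiles c (d + 1) a (b + 1) = true)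
    ↔ (PySem.Set.len (PySem.Set.ofList (tiles.filter
          (fun t => decide (a ≤ t.1 ∧ t.1 ≤ b ∧ c ≤ t.2 ∧ t.2 ≤ d))))
        = (b - a + 1) * (d - c + 1)) := by
  set p : Int × Int → Bool := fun t => decide (a ≤ t.1 ∧ t.1 ≤ b ∧ c ≤ t.2 ∧ t.2 ≤ d) with hp
  set S : List (Int × Int) := PySem.Set.ofList (tiles.filter p) with hS
  set R : Finset (Int × Int) := Finset.Icc a b ×ˢ Finset.Icc c d with hR
  have hSnodup : S.Nodup := PySem.Set.nodup_ofList _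
  have hmemS : ∀ t, t ∈ S ↔ t ∈ tiles.filter p := fun t => PySem.Set.mem_ofList _ t
  have hmemR : ∀ t : Int × Int, t ∈ R ↔ (a ≤ t.1 ∧ t.1 ≤ b ∧ c ≤ t.2 ∧ t.2 ≤ d) := by
    intro t; simp [hR, Finset.mem_product, Finset.mem_Icc]; tauto
  have hsub : S.toFinset ⊆ R := by
    intro t ht
    rw [List.mem_toFinset] at ht
    rw [hmemS] at ht
    rw [List.mem_filter] at ht
    rw [hmemR]
    have := ht.2
    simpa [hp] using this
  have hcardR : (R.card : Int) = (b - a + 1) * (d - c + 1) := by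
    rw [hR, Finset.card_product, Int.card_Icc, Int.card_Icc]
    push_cast [Int.toNat_of_nonneg (by omega : (0:Int) ≤ b + 1 - a),
      Int.toNat_of_nonneg (by omega : (0:Int) ≤ d + 1 - c)]
    ring
  have hcardS : S.toFinset.card = S.length := List.toFinset_card_of_nodup hSnodup
  have hlen : PySem.Set.len S = (S.length : Int) := rfl
  have hlhs : (pvOuterA tiles c (d + 1) a (b + 1) = true)
      ↔ ∀ t : Int × Int, t ∈ R → t ∈ tiles := by
    rw [pvOuterA_true_iff]
    constructor
    · intro h t htR
      rw [hmemR] at htR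
      exact h t.1 (by omega) (by omega) t.2 (by omega) (by omega)
    · intro h x hx1 hx2 y hy1 hy2
      exact h (x, y) (by rw [hmemR]; simp; omega)
  rw [hlhs, hlen, ← hcardR]
  constructor
  · intro h
    have hRsub : R ⊆ S.toFinset := by
      intro t htR
      rw [List.mem_toFinset, hmemS, List.mem_filter]
      refine ⟨h t htR, ?_⟩
      have := (hmemR t).mp htR
      simp [hp]; tauto
    have heq : S.toFinset = R := Finset.Subset.antisymm hsub hRsub
    rw [← heq, hcardS]
  · intro h
    have hcards : R.card ≤ S.toFinset.card := by
      have : (S.toFinset.card : Int) = R.card := by rw [hcardS]; exact_mod_cast h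
      omega
    have heq : S.toFinset = R := Finset.eq_of_subset_of_card_le hsub hcards
    intro t htR
    have : t ∈ S.toFinset := heq ▸ htR
    rw [List.mem_toFinset, hmemS, List.mem_filter] at this
    exact this.1

-- ===== VERDICT (by name: the statement is the Claim_ definition above) =====
theorem is_rectangle_valid_spec : Claim_equal_is_rectangle_valid := by
  intro c1 c2 tiles _
  unfold Spec_is_rectangle_valid
  have h := pv_main tiles (min c1.1 c2.1) (max c1.1 c2.1) (min c1.2 c2.2) (max c1.2 c2.2)
    (min_le_max) (min_le_max)
  have ha : is_rectangle_valid c1 c2 tiles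
      = pvOuterA tiles (min c1.2 c2.2) (max c1.2 c2.2 + 1) (min c1.1 c2.1) (max c1.1 c2.1 + 1) := rfl
  have halt : is_rectangle_valid_alt c1 c2 tiles
      = decide (PySem.Set.len (PySem.Set.ofList (tiles.filter
          (fun t => decide (min c1.1 c2.1 ≤ t.1 ∧ t.1 ≤ max c1.1 c2.1 ∧
            min c1.2 c2.2 ≤ t.2 ∧ t.2 ≤ max c1.2 c2.2))))
        = (max c1.1 c2.1 - min c1.1 c2.1 + 1) * (max c1.2 c2.2 - min c1.2 c2.2 + 1)) := rfl
  rw [ha, halt]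
  cases hb : pvOuterA tiles (min c1.2 c2.2) (max c1.2 c2.2 + 1) (min c1.1 c2.1) (max c1.1 c2.1 + 1)
  · rw [hb] at h
    symm
    rw [decide_eq_false_iff_not]
    intro hc
    exact absurd (h.mpr hc) (by simp)
  · symm
    rw [decide_eq_true_eq]
    exact h.mp hb
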